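-- pv_equiv track=rewrite | github.com/miliar/Code_Jam_Webscraper | solutions_python/Problem_1/618.py | minSwitches
-- ===== SOURCE A (Python) =====
-- def minSwitches(s, q):
--    if not len(q):
--       return 0
--    qunique = [x for x in orderedSet(q) if (x in s)]
--    qset = set(qunique)
--    sset = set(s)
--    if len(sset.difference(qset)):
--       return 0
--    return 1 + minSwitches(s, q[q.index(qunique[-1]):])
--
-- def orderedSet(n):
--    r = []
--    [r.append(x) for x in n if not (x in r)]
--    return r
-- ===== SOURCE B (Python) =====
-- def minSwitches(s, q):
--     need = set(s)
--     count = 0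
--     seen = set()
--     for c in q:
--         if c in need:
--             seen.add(c)
--             if len(seen) == len(need):
--                 count += 1
--                 seen = {c}
--     return count
-- ===== Notes on version B (the rewrite author's own statement) =====
-- stated objective: faster
-- what changed: Replaced A's recursion (which re-deduplicates and re-scans the remaining query on every window) by a single left-to-right pass that maintains the set of needed characters seen so far, counts a window whenever the set is complete and resets it to the completing character.
import Mathlib
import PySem

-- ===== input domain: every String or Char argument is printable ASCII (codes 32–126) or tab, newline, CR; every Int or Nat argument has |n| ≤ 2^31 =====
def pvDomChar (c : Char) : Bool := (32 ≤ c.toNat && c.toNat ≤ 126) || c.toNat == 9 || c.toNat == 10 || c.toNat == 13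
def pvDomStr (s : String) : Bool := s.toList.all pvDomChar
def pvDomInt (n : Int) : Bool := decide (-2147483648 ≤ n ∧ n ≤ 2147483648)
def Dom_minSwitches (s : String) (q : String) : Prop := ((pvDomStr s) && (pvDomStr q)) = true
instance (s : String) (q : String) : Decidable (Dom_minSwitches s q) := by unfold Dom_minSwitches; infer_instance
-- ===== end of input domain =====

-- B replaces A's recursive re-scanning by one linear pass (faster in a timing run; asymptotic change).

-- ===== PORT A =====
-- helper orderedSet: r = []; append x for x in n if x not in r
def orderedSetPort (n : List Char) : List Char :=
  n.foldl (fun r x => if x ∈ r then r else r ++ [x]) []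

-- 'x in s' for a single character x of q is character membership, ported as x ∈ s
def minSwitchesAux (s : List Char) (q : List Char) : Int :=
  if q.length = 0 then 0
  else
    let qunique := (orderedSetPort q).filter (fun x => decide (x ∈ s))
    let qset := PySem.Set.ofList qunique
    let sset := PySem.Set.ofList s
    if (PySem.Set.diff sset qset).length ≠ 0 then 0
    else
      match (PySem.List.pyGet? qunique (-1)).bind (fun c => PySem.List.index? q c) with
      | none => 0   -- qunique is empty: Python raises IndexError on qunique[-1] (outside Pre_)
      | some i =>
        if h : 0 < i ∧ i < q.length then
          1 + minSwitchesAux s (PySem.List.slice q (some (i : Int)) none)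
        else 0      -- i = 0: Python recurses forever on the same q here (outside Pre_)
termination_by q.length
decreasing_by
  rw [PySem.List.slice_from_natCast, List.length_drop]
  omega

def minSwitches (s : String) (q : String) : Int :=
  minSwitchesAux s.toList q.toList

-- ===== PORT B =====
-- the loop body of Source B's single pass
def altStep (need : PySem.Set Char) (st : Int × PySem.Set Char) (c : Char) : Int × PySem.Set Char :=
  if need.contains c then
    if PySem.Set.len (st.2.add c) = PySem.Set.len need then (st.1 + 1, PySem.Set.ofList [c])
    else (st.1, st.2.add c)
  else st

def minSwitches_alt (s : String) (q : String) : Int :=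
  let need := PySem.Set.ofList s.toList
  (q.toList.foldl (altStep need) ((0 : Int), PySem.Set.empty)).1

-- ===== PRECONDITION & SPEC =====
-- Pre_ excludes exactly the inputs on which A raises: an empty s with a non-empty q (IndexError on
-- qunique[-1]) and an s made of one repeated character that occurs in q (A recurses on the same q
-- forever, raising RecursionError).
def Pre_minSwitches (s : String) (q : String) : Prop :=
  ((!s.toList.isEmpty || q.toList.isEmpty) &&
    s.toList.all (fun c => !(s.toList.all (· == c)) || !(q.toList.contains c))) = true
instance (s : String) (q : String) : Decidable (Pre_minSwitches s q) := by
  unfold Pre_minSwitches; infer_instance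

def pvWitness_minSwitches : String × String := ("ab", "abab")

def Spec_minSwitches (s : String) (q : String) (out : Int) : Prop := out = minSwitches_alt s q
instance (s : String) (q : String) (out : Int) : Decidable (Spec_minSwitches s q out) := by
  unfold Spec_minSwitches; infer_instance

-- ===== CLAIM (what is proved, stated in full; the proofs are below) =====
def Claim_equal_minSwitches : Prop := ∀ (s : String) (q : String), Dom_minSwitches s q → Pre_minSwitches s q → Spec_minSwitches s q (minSwitches s q)

-- ===== LEMMAS AND PROOFS =====

-- the set of needed characters accumulated by B's pass over l, starting from seen
def seenAcc (need seen : PySem.Set Char) (l : List Char) : PySem.Set Char :=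
  l.foldl (fun sn c => if need.contains c then sn.add c else sn) seen

theorem mem_seenAcc (need : PySem.Set Char) :
    ∀ (l : List Char) (seen : PySem.Set Char) (x : Char),
      x ∈ seenAcc need seen l ↔ x ∈ seen ∨ (x ∈ l ∧ x ∈ need) := by
  intro l
  induction l with
  | nil => intro seen x; simp [seenAcc]
  | cons c l ih =>
    intro seen x
    by_cases hc : c ∈ need
    · have hcont : need.contains c = true := (PySem.Set.contains_iff need c).mpr hc
      simp only [seenAcc, List.foldl_cons, hcont, if_true]
      rw [show (List.foldl _ (seen.add c) l) = seenAcc need (seen.add c) l from rfl, ih]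
      simp only [PySem.Set.mem_add, List.mem_cons]
      constructor
      · rintro ((h | rfl) | ⟨h1, h2⟩) <;> tauto
      · rintro (h | ⟨(rfl | h1), h2⟩) <;> tauto
    · have hcont : need.contains c = false := by
        cases h' : need.contains c
        · rfl
        · exact absurd ((PySem.Set.contains_iff need c).mp h') hc
      simp only [seenAcc, List.foldl_cons, hcont, if_neg Bool.false_ne_true]
      rw [show (List.foldl _ seen l) = seenAcc need seen l from rfl, ih]
      simp only [List.mem_cons]
      constructor
      · tauto
      · rintro (h | ⟨(rfl | h1), h2⟩) <;> tauto

theorem nodup_seenAcc (need : PySem.Set Char) :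
    ∀ (l : List Char) (seen : PySem.Set Char), seen.Nodup → (seenAcc need seen l).Nodup := by
  intro l
  induction l with
  | nil => intro seen h; exact h
  | cons c l ih =>
    intro seen h
    simp only [seenAcc, List.foldl_cons]
    split
    · exact ih (seen.add c) (PySem.Set.nodup_add seen c h)
    · exact ih seen h

theorem nodup_length_lt {A B : List Char} (hA : A.Nodup) (hB : B.Nodup)
    (hsub : ∀ x ∈ A, x ∈ B) {b : Char} (hb : b ∈ B) (hnb : b ∉ A) :
    A.length < B.length := by
  rw [← List.toFinset_card_of_nodup hA, ← List.toFinset_card_of_nodup hB]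
  apply Finset.card_lt_card
  constructor
  · intro x hx
    simp only [List.mem_toFinset] at hx ⊢
    exact hsub x hx
  · intro hcon
    have := hcon (List.mem_toFinset.mpr hb)
    exact hnb (List.mem_toFinset.mp this)

theorem nodup_length_eq {A B : List Char} (hA : A.Nodup) (hB : B.Nodup)
    (h : ∀ x, x ∈ A ↔ x ∈ B) : A.length = B.length := by
  rw [← List.toFinset_card_of_nodup hA, ← List.toFinset_card_of_nodup hB]
  congr 1
  ext x
  simp only [List.mem_toFinset]
  exact h x

theorem foldl_altStep_shift (need : PySem.Set Char) :
    ∀ (l : List Char) (st : Int × PySem.Set Char),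
      l.foldl (altStep need) st
        = (st.1 + (l.foldl (altStep need) (0, st.2)).1, (l.foldl (altStep need) (0, st.2)).2) := by
  intro l
  induction l with
  | nil => intro st; simp
  | cons c l ih =>
    intro st
    simp only [List.foldl_cons]
    rw [ih (altStep need st c), ih (altStep need (0, st.2) c)]
    have h1 : (altStep need st c).1 = st.1 + (altStep need (0, st.2) c).1 := by
      unfold altStep; split_ifs <;> simp
    have h2 : (altStep need st c).2 = (altStep need (0, st.2) c).2 := by
      unfold altStep; split_ifs <;> simp
    rw [h1, h2]
    simp [add_assoc]

theorem foldl_no_complete (need : PySem.Set Char) (hBnd : List.Nodup need) :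
    ∀ (l : List Char) (seen : PySem.Set Char) (k : Int),
      seen.Nodup → (∀ x ∈ seen, x ∈ need) →
      (∃ c0, c0 ∈ need ∧ c0 ∉ l ∧ c0 ∉ seen) →
      l.foldl (altStep need) (k, seen) = (k, seenAcc need seen l) := by
  intro l
  induction l with
  | nil => intro seen k _ _ _; rfl
  | cons c l ih =>
    intro seen k hnd hsub ⟨c0, hc0need, hc0l, hc0seen⟩
    have hc0c : c0 ≠ c := fun h => hc0l (h ▸ List.mem_cons_self ..)
    have hc0l' : c0 ∉ l := fun h => hc0l (List.mem_cons_of_mem _ h)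
    by_cases hc : c ∈ need
    · have hcont : need.contains c = true := (PySem.Set.contains_iff need c).mpr hc
      have hseen' : ∀ x ∈ seen.add c, x ∈ need := by
        intro x hx
        rcases (PySem.Set.mem_add seen c x).mp hx with h | rfl
        · exact hsub x h
        · exact hc
      have hc0seen' : c0 ∉ seen.add c := by
        intro h
        rcases (PySem.Set.mem_add seen c c0).mp h with h | h
        · exact hc0seen h
        · exact hc0c h
      have hlt : (seen.add c).length < need.length :=
        nodup_length_lt (PySem.Set.nodup_add seen c hnd) hBnd
          hseen' hc0need hc0seen'
      have hne : ¬ (PySem.Set.len (seen.add c) = PySem.Set.len need) := by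
        simp only [PySem.Set.len]
        omega
      simp only [List.foldl_cons, altStep, hcont, if_true, hne, if_neg, not_false_iff]
      rw [ih (seen.add c) k (PySem.Set.nodup_add seen c hnd) hseen' ⟨c0, hc0need, hc0l', hc0seen'⟩]
      simp [seenAcc, hc]
    · have hcont : need.contains c = false := by
        cases h' : need.contains c
        · rfl
        · exact absurd ((PySem.Set.contains_iff need c).mp h') hc
      simp only [List.foldl_cons, altStep, hcont, if_neg Bool.false_ne_true]
      rw [ih seen k hnd hsub ⟨c0, hc0need, hc0l', hc0seen⟩]
      simp [seenAcc, hc]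

-- the last element of the (ordered) dedup of q filtered by p is the p-character of q whose first
-- occurrence in q is latest
theorem dedup_last_spec (p : Char → Bool) :
    ∀ (q : List Char) (c : Char),
      ((PySem.Set.ofList q).filter p).getLast? = some c →
      p c = true ∧ c ∈ q ∧ ∃ i, PySem.List.index? q c = some i ∧
        ∀ x ∈ q, p x = true → x ∈ q.take (i + 1) := by
  intro q
  induction q using List.reverseRecOn with
  | nil => intro c h; simp [PySem.Set.ofList] at h
  | append_singleton q a ih =>
    intro c hlast
    have hof : PySem.Set.ofList (q ++ [a]) = (PySem.Set.ofList q).add a := by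
      rw [PySem.Set.ofList_eq_foldl, PySem.Set.ofList_eq_foldl, List.foldl_append]
      rfl
    by_cases ha : a ∈ PySem.Set.ofList q
    · have haq : a ∈ q := (PySem.Set.mem_ofList q a).mp ha
      have : (PySem.Set.ofList q).add a = PySem.Set.ofList q := by
        unfold PySem.Set.add
        rw [if_pos ((PySem.Set.contains_iff _ a).mpr ha)]
      rw [hof, this] at hlast
      obtain ⟨pc, cq, i, hidx, hcov⟩ := ih c hlast
      obtain ⟨hi, -, -⟩ := PySem.List.getElem_of_index?_eq_some hidx
      refine ⟨pc, List.mem_append_left _ cq, i, ?_, ?_⟩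
      · rw [PySem.List.index?_append_of_mem _ cq, hidx]
      · intro x hx hpx
        rw [List.take_append_of_le_length (by omega)]
        rcases List.mem_append.mp hx with h | h
        · exact hcov x h hpx
        · have : x = a := by simpa using h
          exact hcov x (this ▸ haq) hpx
    · have haq : a ∉ q := fun h => ha ((PySem.Set.mem_ofList q a).mpr h)
      have : (PySem.Set.ofList q).add a = PySem.Set.ofList q ++ [a] := by
        unfold PySem.Set.add
        rw [if_neg]
        intro h
        exact ha ((PySem.Set.contains_iff _ a).mp h)
      rw [hof, this, List.filter_append] at hlast
      by_cases hpa : p a = true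
      · have : List.filter p [a] = [a] := by simp [hpa]
        rw [this, List.getLast?_concat] at hlast
        obtain rfl : a = c := by simpa using hlast
        refine ⟨hpa, by simp, q.length, ?_, ?_⟩
        · exact PySem.List.index?_append_singleton_self q a haq
        · intro x hx _
          have : (q ++ [a]).take (q.length + 1) = q ++ [a] := by
            apply List.take_of_length_le
            simp
          rw [this]
          exact hx
      · have : List.filter p [a] = [] := by
          simp [List.filter]
          cases h' : p a
          · rfl
          · exact absurd h' hpa
        rw [this, List.append_nil] at hlast
        obtain ⟨pc, cq, i, hidx, hcov⟩ := ih c hlast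
        obtain ⟨hi, -, -⟩ := PySem.List.getElem_of_index?_eq_some hidx
        refine ⟨pc, List.mem_append_left _ cq, i, ?_, ?_⟩
        · rw [PySem.List.index?_append_of_mem _ cq, hidx]
        · intro x hx hpx
          rw [List.take_append_of_le_length (by omega)]
          rcases List.mem_append.mp hx with h | h
          · exact hcov x h hpx
          · have : x = a := by simpa using h
            exact absurd hpx (by rw [this]; exact fun h2 => absurd h2 (by simpa using hpa))

theorem orderedSetPort_eq (q : List Char) : orderedSetPort q = PySem.Set.ofList q := by
  rw [PySem.Set.ofList_eq_foldl]
  unfold orderedSetPort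
  congr 1
  funext r x
  unfold PySem.Set.add
  by_cases h : x ∈ r
  · rw [if_pos h, if_pos ((PySem.Set.contains_iff r x).mpr h)]
  · rw [if_neg h, if_neg (fun hc => h ((PySem.Set.contains_iff r x).mp hc))]

theorem aux_eq (s : List Char) (hs : 2 ≤ (PySem.Set.ofList s : List Char).length) :
    ∀ (q : List Char),
      minSwitchesAux s q
        = (List.foldl (altStep (PySem.Set.ofList s)) ((0 : Int), PySem.Set.empty) q).1 := by
  suffices H : ∀ (n : Nat) (q : List Char), q.length ≤ n →
      minSwitchesAux s q
        = (List.foldl (altStep (PySem.Set.ofList s)) ((0 : Int), PySem.Set.empty) q).1 from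
    fun q => H q.length q le_rfl
  intro n
  induction n with
  | zero =>
    intro q hq
    have hqe : q = [] := List.eq_nil_of_length_eq_zero (Nat.le_zero.mp hq)
    subst hqe
    rw [minSwitchesAux]
    simp
  | succ n ih =>
    intro q hq
    by_cases hqe : q = []
    · subst hqe; rw [minSwitchesAux]; simp
    · have hql : ¬ q.length = 0 := fun h => hqe (List.eq_nil_of_length_eq_zero h)
      rw [minSwitchesAux, if_neg hql]
      set need := (PySem.Set.ofList s : PySem.Set Char) with hneeddef
      set p : Char → Bool := fun x => decide (x ∈ s) with hpdef
      have hqu : ∀ x, x ∈ (orderedSetPort q).filter p ↔ (x ∈ q ∧ x ∈ s) := by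
        intro x
        rw [orderedSetPort_eq, List.mem_filter, PySem.Set.mem_ofList, hpdef]
        simp
      by_cases hcov : ∀ x ∈ s, x ∈ q
      · -- coverage: the difference is empty and A recurses at the completing character
        have hdiff : (PySem.Set.diff need
            (PySem.Set.ofList ((orderedSetPort q).filter p))).length = 0 := by
          rw [List.length_eq_zero_iff, List.eq_nil_iff_forall_not_mem]
          intro x hx
          obtain ⟨hx1, hx2⟩ := (PySem.Set.mem_diff _ _ x).mp hx
          have hxs : x ∈ s := (PySem.Set.mem_ofList s x).mp hx1
          exact hx2 ((PySem.Set.mem_ofList _ x).mpr ((hqu x).mpr ⟨hcov x hxs, hxs⟩))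
        rw [if_neg (by simpa using hdiff)]
        have hne : (orderedSetPort q).filter p ≠ [] := by
          obtain ⟨x, hx⟩ := List.exists_mem_of_length_pos (l := (need : List Char)) (by omega)
          have hxs : x ∈ s := (PySem.Set.mem_ofList s x).mp hx
          intro hnil
          have hmem := (hqu x).mpr ⟨hcov x hxs, hxs⟩
          rw [hnil] at hmem
          simp at hmem
        obtain ⟨c, hc⟩ : ∃ c, ((orderedSetPort q).filter p).getLast? = some c := by
          cases h' : ((orderedSetPort q).filter p).getLast? with
          | none => exact absurd (List.getLast?_eq_none_iff.mp h') hne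
          | some c => exact ⟨c, rfl⟩
        have hc' : ((PySem.Set.ofList q).filter p).getLast? = some c := by
          rw [← orderedSetPort_eq]; exact hc
        obtain ⟨pc, cq, i, hidx, hcovr⟩ := dedup_last_spec p q c hc'
        have hcs : c ∈ s := by simpa [hpdef] using pc
        have cneed : c ∈ need := (PySem.Set.mem_ofList s c).mpr hcs
        obtain ⟨hilt, hqi, hfirst⟩ := PySem.List.getElem_of_index?_eq_some hidx
        -- 0 < i : need has a second character besides c
        obtain ⟨x, hxneed, hxc⟩ : ∃ x, x ∈ need ∧ x ≠ c := by
          by_contra hcon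
          push_neg at hcon
          have hsub : ∀ y ∈ (need : List Char), y ∈ ([c] : List Char) := by
            intro y hy; simp [hcon y hy]
          have hcard : (need : List Char).length ≤ 1 := by
            have h1 := List.toFinset_card_of_nodup (l := (need : List Char))
              (hneeddef ▸ PySem.Set.nodup_ofList s)
            have h2 : (need : List Char).toFinset ⊆ ({c} : Finset Char) := by
              intro y hy
              have := hsub y (List.mem_toFinset.mp hy)
              simpa using this
            have := Finset.card_le_card h2
            simp at this
            omega
          omega
        have hxs2 : x ∈ s := (PySem.Set.mem_ofList s x).mp hxneed
        have hxtake : x ∈ q.take (i + 1) := hcovr x (hcov x hxs2) (by simp [hpdef, hxs2])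
        have hipos : 0 < i := by
          rcases Nat.eq_zero_or_pos i with rfl | h
          · exfalso
            have h1 : q.take 1 = [c] := by
              rw [List.take_succ]
              simp [List.getElem?_eq_getElem hilt, hqi]
            rw [h1] at hxtake
            simp at hxtake
            exact hxc hxtake
          · exact h
        have hdrop : q.drop i = c :: q.drop (i + 1) := by
          rw [List.drop_eq_getElem_cons hilt, hqi]
        have htake : q.take (i + 1) = q.take i ++ [c] := by
          rw [List.take_succ]
          simp [List.getElem?_eq_getElem hilt, hqi]
        have hcnotin : c ∉ q.take i := by
          intro hmem
          obtain ⟨j, hj, hje⟩ := List.getElem_of_mem hmem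
          have hjlen : j < i := by
            have := hj; simp [List.length_take] at this; omega
          rw [List.getElem_take] at hje
          exact hfirst j hjlen hje
        -- reduce A's match
        rw [PySem.List.pyGet?_neg_one, hc]
        simp only [Option.bind_some]
        rw [hidx]
        simp only []
        rw [dif_pos ⟨hipos, hilt⟩, PySem.List.slice_from_natCast]
        rw [ih (q.drop i) (by rw [List.length_drop]; omega)]
        -- decompose B's pass over q at position i
        conv_rhs => rw [← List.take_append_drop i q]
        rw [List.foldl_append]
        have hPre : List.foldl (altStep need) ((0 : Int), PySem.Set.empty) (q.take i)
            = (0, seenAcc need PySem.Set.empty (q.take i)) :=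
          foldl_no_complete need (hneeddef ▸ PySem.Set.nodup_ofList s) (q.take i)
            PySem.Set.empty 0 (by simp [PySem.Set.empty]) (by simp [PySem.Set.empty])
            ⟨c, cneed, hcnotin, by simp [PySem.Set.empty]⟩
        rw [hPre, hdrop]
        set P := seenAcc need PySem.Set.empty (q.take i) with hPdef
        have hPmem : ∀ x, x ∈ P ↔ (x ∈ q.take i ∧ x ∈ need) := by
          intro y
          rw [hPdef, mem_seenAcc]
          simp [PySem.Set.empty]
        have hPnodup : P.Nodup :=
          nodup_seenAcc need _ _ (by simp [PySem.Set.empty])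
        have haddmem : ∀ y, y ∈ P.add c ↔ y ∈ need := by
          intro y
          rw [PySem.Set.mem_add]
          constructor
          · rintro (h | rfl)
            · exact ((hPmem y).mp h).2
            · exact cneed
          · intro hy
            have hys : y ∈ s := (PySem.Set.mem_ofList s y).mp hy
            have := hcovr y (hcov y hys) (by simp [hpdef, hys])
            rw [htake] at this
            rcases List.mem_append.mp this with h | h
            · exact Or.inl ((hPmem y).mpr ⟨h, hy⟩)
            · exact Or.inr (by simpa using h)
        have hlenP : PySem.Set.len (P.add c) = PySem.Set.len need := by
          have hl := nodup_length_eq (PySem.Set.nodup_add P c hPnodup)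
            (hneeddef ▸ PySem.Set.nodup_ofList s) haddmem
          simp [PySem.Set.len, hl]
        have hsingle : (PySem.Set.empty.add c : PySem.Set Char) = [c] := rfl
        have hstep : altStep need ((0 : Int), P) c = (1, PySem.Set.ofList [c]) := by
          unfold altStep
          rw [if_pos ((PySem.Set.contains_iff need c).mpr cneed), if_pos hlenP]
          simp
        have hstep0 : altStep need ((0 : Int), PySem.Set.empty) c = (0, PySem.Set.ofList [c]) := by
          unfold altStep
          rw [if_pos ((PySem.Set.contains_iff need c).mpr cneed), if_neg]
          · rfl
          · rw [hsingle]
            simp only [PySem.Set.len, List.length_singleton]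
            omega
        rw [List.foldl_cons, List.foldl_cons, hstep, hstep0]
        rw [foldl_altStep_shift need (q.drop (i + 1)) (1, PySem.Set.ofList [c])]
      · -- no coverage: A returns 0 and B's pass never completes the set
        push_neg at hcov
        obtain ⟨c0, hc0s, hc0q⟩ := hcov
        have hc0need : c0 ∈ need := (PySem.Set.mem_ofList s c0).mpr hc0s
        have hmemdiff : c0 ∈ PySem.Set.diff need
            (PySem.Set.ofList ((orderedSetPort q).filter p)) := by
          rw [PySem.Set.mem_diff]
          refine ⟨hc0need, fun h => hc0q ?_⟩
          have := (PySem.Set.mem_ofList _ c0).mp h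
          exact ((hqu c0).mp this).1
        rw [if_pos (by
          intro h
          rw [List.length_eq_zero_iff] at h
          rw [h] at hmemdiff
          simp at hmemdiff)]
        rw [foldl_no_complete need (hneeddef ▸ PySem.Set.nodup_ofList s) q
          PySem.Set.empty 0 (by simp [PySem.Set.empty]) (by simp [PySem.Set.empty])
          ⟨c0, hc0need, hc0q, by simp [PySem.Set.empty]⟩]

-- ===== VERDICT (by name: the statement is the Claim_ definition above) =====
theorem pre_unfold (s q : String) (h : Pre_minSwitches s q) :
    (s.toList = [] → q.toList = []) ∧
    ∀ c ∈ s.toList, (∀ d ∈ s.toList, d = c) → c ∉ q.toList := by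
  unfold Pre_minSwitches at h
  rw [Bool.and_eq_true] at h
  obtain ⟨h1, h2⟩ := h
  constructor
  · intro hs
    rcases Bool.or_eq_true _ _ |>.mp h1 with h' | h'
    · rw [Bool.not_eq_true', List.isEmpty_eq_false_iff] at h'
      exact absurd hs h'
    · exact List.isEmpty_iff.mp h'
  · intro c hc hall hq
    have hthis := List.all_eq_true.mp h2 c hc
    rcases Bool.or_eq_true _ _ |>.mp hthis with h' | h'
    · rw [Bool.not_eq_true'] at h'
      have : s.toList.all (· == c) = true :=
        List.all_eq_true.mpr (fun d hd => beq_iff_eq.mpr (hall d hd))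
      rw [this] at h'
      cases h'
    · rw [Bool.not_eq_true'] at h'
      have : c ∈ q.toList := hq
      rw [← List.contains_iff_mem, h'] at this
      cases this

-- ===== VERDICT continued =====
theorem minSwitches_spec : Claim_equal_minSwitches := by
  intro s q _ hpre
  obtain ⟨h1, h2⟩ := pre_unfold s q hpre
  unfold Spec_minSwitches minSwitches minSwitches_alt
  simp only []
  by_cases h0 : (PySem.Set.ofList s.toList : List Char) = []
  · -- s is empty, hence (by Pre_) q is empty: both return 0
    have hsnil : s.toList = [] := by
      rw [List.eq_nil_iff_forall_not_mem]
      intro x hx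
      have := (PySem.Set.mem_ofList s.toList x).mpr hx
      rw [h0] at this
      simp at this
    rw [h1 hsnil, minSwitchesAux]
    simp
  · by_cases h1' : (PySem.Set.ofList s.toList : List Char).length = 1
    · -- s is one repeated character c; by Pre_, c does not occur in q: both return 0
      obtain ⟨c, hc⟩ := List.length_eq_one_iff.mp h1'
      have hcs : c ∈ s.toList := (PySem.Set.mem_ofList s.toList c).mp (by rw [hc]; simp)
      have hall : ∀ d ∈ s.toList, d = c := by
        intro d hd
        have := (PySem.Set.mem_ofList s.toList d).mpr hd
        rw [hc] at this
        simpa using this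
      have hcq : c ∉ q.toList := h2 c hcs hall
      rw [foldl_no_complete (PySem.Set.ofList s.toList) (PySem.Set.nodup_ofList s.toList)
        q.toList PySem.Set.empty 0 (by simp [PySem.Set.empty]) (by simp [PySem.Set.empty])
        ⟨c, (PySem.Set.mem_ofList s.toList c).mpr hcs, hcq, by simp [PySem.Set.empty]⟩]
      by_cases hqe : q.toList = []
      · rw [hqe, minSwitchesAux]; simp
      · rw [minSwitchesAux, if_neg (fun h => hqe (List.eq_nil_of_length_eq_zero h))]
        have hmemdiff : c ∈ PySem.Set.diff (PySem.Set.ofList s.toList)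
            (PySem.Set.ofList ((orderedSetPort q.toList).filter
              (fun x => decide (x ∈ s.toList)))) := by
          rw [PySem.Set.mem_diff]
          refine ⟨(PySem.Set.mem_ofList s.toList c).mpr hcs, fun h => hcq ?_⟩
          have := (PySem.Set.mem_ofList _ c).mp h
          rw [List.mem_filter, orderedSetPort_eq, PySem.Set.mem_ofList] at this
          exact this.1
        rw [if_pos (by
          intro h
          rw [List.length_eq_zero_iff] at h
          rw [h] at hmemdiff
          simp at hmemdiff)]
    · -- s has at least two distinct characters: the window lemma applies
      have hs2 : 2 ≤ (PySem.Set.ofList s.toList : List Char).length := by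
        have hne0 : (PySem.Set.ofList s.toList : List Char).length ≠ 0 :=
          fun h => h0 (List.eq_nil_of_length_eq_zero h)
        omega
      exact aux_eq s.toList hs2 q.toList
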